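-- pv_equiv track=rewrite | github.com/smallsky223/myproject | zmwm_code.py | run_len_float
-- ===== SOURCE A (Python) =====
-- import math
--
-- def run_len_float(val_dset, none_tag, run_len, run_val):
--     run_tag = ''
--     v0_len = 0
--     v1_len = 0
--     flag = 0
--     # 循环遍历，对数据进行游程编码
--     for i in range(0, len(val_dset)):
--         # 当前数据为none_tag时，即无效数据
--         if val_dset[i] == none_tag:
--             # 有效数据长度大于0，说明之前是有效数据游程块，记录后归零
--             if v1_len > 0:
--                 run_tag = run_tag + '1'
--                 run_len.append(v1_len)
--                 v1_len = 0
--                 v0_len = v0_len + 1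
--                 flag = 0
--             # 防止游程块长度超过1个字节
--             elif flag == 1:
--                 run_tag = run_tag + '0'
--                 run_len.append(v0_len)
--                 v0_len = 0
--                 v0_len = v0_len + 1
--                 flag = 0
--             # 否则说明之前是无效数据游程块
--             else:
--                 v0_len = v0_len + 1
--                 if v0_len == 255:
--                     flag = 1
--         # 当前数据为有效数据时
--         else:
--             # 无效数据长度大于0，说明之前是无效数据游程块，记录后归零
--             if v0_len > 0:
--                 run_tag = run_tag + '0'
--                 run_len.append(v0_len)
--                 v0_len = 0
--                 v1_len = v1_len + 1
--                 flag = 0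
--             # 防止游程块长度超过1个字节
--             elif flag == 1:
--                 run_tag = run_tag + '1'
--                 run_len.append(v1_len)
--                 v1_len = 0
--                 v1_len = v1_len + 1
--                 flag = 0
--             # 否则说明之前是有效数据的游程块
--             else:
--                 v1_len = v1_len + 1
--                 if v1_len == 255:
--                     flag = 1
--     # 记录最后的游程块的标志和长度
--     if v0_len > 0:
--         run_tag = run_tag + '0'
--         run_len.append(v0_len)
--     else:
--         run_tag = run_tag + '1'
--         run_len.append(v1_len)
--
--     # 循环遍历此行，记录有效数据
--     for i in range(0, len(val_dset)):
--         if val_dset[i] != none_tag: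
--             run_val.append(val_dset[i])
--
--     # 将游程块标志01串填充到8的倍数，补0
--     run_tag = run_tag.ljust((math.ceil(len(run_tag) / 8)) * 8, '0')
--     return run_tag
-- ===== SOURCE B (Python) =====
-- import math
--
-- def run_len_float(val_dset, none_tag, run_len, run_val):
--     # Two-phase rewrite: first group val_dset into (is_valid, length) runs,
--     # then chunk each run into <=255 pieces; same in-place appends to run_len/run_val as A.
--     runs = []
--     cur = None  # (is_valid, length) of the run being built
--     for v in val_dset:
--         ok = v != none_tag
--         if cur is not None and cur[0] == ok:
--             cur = (ok, cur[1] + 1)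
--         else:
--             if cur is not None:
--                 runs.append(cur)
--             cur = (ok, 1)
--     if cur is not None:
--         runs.append(cur)
--
--     if not runs:
--         tag = '1'
--         run_len.append(0)
--     else:
--         parts = []
--         for ok, length in runs:
--             c = '1' if ok else '0'
--             k = (length - 1) // 255
--             parts.append(c * (k + 1))
--             run_len.extend([255] * k)
--             run_len.append(length - 255 * k)
--         tag = ''.join(parts)
--
--     run_val.extend(v for v in val_dset if v != none_tag)
--     return tag + '0' * (-len(tag) % 8)
-- ===== Notes on version B (the rewrite author's own statement) =====
-- stated objective: idiomatic
-- what changed: Replaces A's interleaved two-counter/flag state machine by a two-phase decomposition: first group the data into (is_valid, length) runs with a single accumulator pass, then chunk each run into <=255 pieces arithmetically (k = (L-1)//255) and pad; same in-place appends to run_len and run_val.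
import Mathlib
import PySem

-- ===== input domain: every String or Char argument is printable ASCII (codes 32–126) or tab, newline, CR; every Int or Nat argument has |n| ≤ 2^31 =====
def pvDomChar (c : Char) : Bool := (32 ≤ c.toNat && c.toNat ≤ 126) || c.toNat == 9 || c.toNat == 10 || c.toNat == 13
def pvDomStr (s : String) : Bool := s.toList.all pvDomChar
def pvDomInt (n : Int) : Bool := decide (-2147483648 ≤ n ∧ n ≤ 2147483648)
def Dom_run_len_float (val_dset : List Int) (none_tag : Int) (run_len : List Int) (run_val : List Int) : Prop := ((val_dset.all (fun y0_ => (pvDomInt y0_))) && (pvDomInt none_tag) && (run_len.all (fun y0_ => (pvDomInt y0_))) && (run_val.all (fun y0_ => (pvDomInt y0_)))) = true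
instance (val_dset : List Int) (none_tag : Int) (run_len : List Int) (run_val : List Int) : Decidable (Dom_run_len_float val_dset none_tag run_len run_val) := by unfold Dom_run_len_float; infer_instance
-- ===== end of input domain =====

-- B replaces A's interleaved two-counter/flag run-length state machine by a two-phase
-- decomposition (group into runs, then chunk each run into <=255 pieces arithmetically);
-- same objective: idiomatic. A and B both append to run_len/run_val in place; the proved
-- equivalence is about the RETURN value (the tag string); B performs the same mutations.

-- ===== PORT A =====
-- one loop step of A's for-loop; state = (run_tag, v0_len, v1_len, flag, run_len)
def pvAStep (none_tag : Int) (s : List Char × Int × Int × Int × List Int) (v : Int) :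
    List Char × Int × Int × Int × List Int :=
  match s with
  | (tag, v0, v1, flag, rl) =>
    if v = none_tag then
      if v1 > 0 then (tag ++ ['1'], v0 + 1, 0, 0, rl ++ [v1])
      else if flag = 1 then (tag ++ ['0'], 0 + 1, v1, 0, rl ++ [v0])
      else (tag, v0 + 1, v1, if v0 + 1 = 255 then 1 else flag, rl)
    else
      if v0 > 0 then (tag ++ ['0'], 0, v1 + 1, 0, rl ++ [v0])
      else if flag = 1 then (tag ++ ['1'], v0, 0 + 1, 0, rl ++ [v1])
      else (tag, v0, v1 + 1, if v1 + 1 = 255 then 1 else flag, rl)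

def run_len_float (val_dset : List Int) (none_tag : Int) (run_len : List Int) (run_val : List Int) : String :=
  match val_dset.foldl (pvAStep none_tag) (([] : List Char), (0 : Int), (0 : Int), (0 : Int), run_len) with
  | (tag, v0, _v1, _flag, _rl) =>
    -- final block: record '0' or '1' (the run_len append and the run_val loop do not
    -- affect the returned string)
    let tag := if v0 > 0 then tag ++ ['0'] else tag ++ ['1']
    -- run_tag.ljust(math.ceil(len/8)*8, '0'): exact, since math.ceil(n/8) = (n+7)/8 in Nat
    -- (the float division is exact for these lengths)
    String.ofList (tag ++ List.replicate ((tag.length + 7) / 8 * 8 - tag.length) '0')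

-- ===== PORT B =====
-- one loop step of B's grouping pass; state = (runs, cur)
def pvBStep (none_tag : Int) (s : List (Bool × Int) × Option (Bool × Int)) (v : Int) :
    List (Bool × Int) × Option (Bool × Int) :=
  match s with
  | (runs, cur) =>
    let ok := v != none_tag
    match cur with
    | some (b, L) => if b == ok then (runs, some (b, L + 1)) else (runs ++ [(b, L)], some (ok, 1))
    | none => (runs, some (ok, 1))

def pvTagChar (b : Bool) : Char := if b then '1' else '0'

-- tag characters contributed by one run: c * (k + 1) with k = (length - 1) // 255
def pvRunTag (r : Bool × Int) : List Char :=
  List.replicate ((PySem.Int.floordiv (r.2 - 1) 255) + 1).toNat (pvTagChar r.1)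

def run_len_float_alt (val_dset : List Int) (none_tag : Int) (run_len : List Int) (run_val : List Int) : String :=
  let s := val_dset.foldl (pvBStep none_tag) (([] : List (Bool × Int)), (none : Option (Bool × Int)))
  let runs := match s.2 with
    | some c => s.1 ++ [c]
    | none => s.1
  -- run_len.extend / run_val.extend do not affect the returned string
  let tag := if runs.isEmpty then ['1'] else (runs.map pvRunTag).flatten
  -- tag + '0' * (-len(tag) % 8)
  String.ofList (tag ++ List.replicate (PySem.Int.mod (-(tag.length : Int)) 8).toNat '0')

-- ===== PRECONDITION & SPEC =====
def Spec_run_len_float (val_dset : List Int) (none_tag : Int) (run_len : List Int) (run_val : List Int) (out : String) : Prop := out = run_len_float_alt val_dset none_tag run_len run_val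
instance (val_dset : List Int) (none_tag : Int) (run_len : List Int) (run_val : List Int) (out : String) : Decidable (Spec_run_len_float val_dset none_tag run_len run_val out) := by unfold Spec_run_len_float; infer_instance

-- ===== CLAIM (what is proved, stated in full; the proofs are below) =====
def Claim_equal_run_len_float : Prop := ∀ (val_dset : List Int) (none_tag : Int) (run_len : List Int) (run_val : List Int), Dom_run_len_float val_dset none_tag run_len run_val → Spec_run_len_float val_dset none_tag run_len run_val (run_len_float val_dset none_tag run_len run_val)

-- ===== LEMMAS AND PROOFS =====

-- invariant relating A's loop state to B's grouping state: if a run (b, L) is open,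
-- then L = 255*k + r with the k full 255-chunks already emitted into A's tag, the open
-- counter holding r ∈ [1, 255], and flag set exactly when r = 255.
def pvRel (a : List Char × Int × Int × Int × List Int)
    (s : List (Bool × Int) × Option (Bool × Int)) : Prop :=
  match s.2 with
  | none => s.1 = [] ∧ a.1 = [] ∧ a.2.1 = 0 ∧ a.2.2.1 = 0 ∧ a.2.2.2.1 = 0
  | some (b, L) => ∃ (k : Nat) (r : Int), 1 ≤ r ∧ r ≤ 255 ∧ L = 255 * k + r ∧
      a.1 = (s.1.map pvRunTag).flatten ++ List.replicate k (pvTagChar b) ∧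
      (if b then a.2.2.1 = r ∧ a.2.1 = 0 else a.2.1 = r ∧ a.2.2.1 = 0) ∧
      a.2.2.2.1 = (if r = 255 then 1 else 0)

lemma pv_floordiv_run (k : Nat) (r : Int) (h1 : 1 ≤ r) (h2 : r ≤ 255) :
    PySem.Int.floordiv (255 * (k : Int) + r - 1) 255 = (k : Int) := by
  rw [PySem.Int.floordiv_eq_iff_of_pos (by norm_num)]
  constructor <;> nlinarith

lemma pvRunTag_eq (b : Bool) (k : Nat) (r : Int) (h1 : 1 ≤ r) (h2 : r ≤ 255) :
    pvRunTag (b, 255 * (k : Int) + r) = List.replicate (k + 1) (pvTagChar b) := by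
  simp only [pvRunTag, pv_floordiv_run k r h1 h2]
  norm_num

lemma pvRel_step (t v : Int) (a : List Char × Int × Int × Int × List Int)
    (s : List (Bool × Int) × Option (Bool × Int)) (h : pvRel a s) :
    pvRel (pvAStep t a v) (pvBStep t s v) := by
  obtain ⟨runs, cur⟩ := s
  obtain ⟨tag, v0, v1, flag, rl⟩ := a
  cases cur with
  | none =>
    obtain ⟨hr, ht, h0, h1, hf⟩ := h
    subst hr ht h0 h1 hf
    by_cases hv : v = t <;>
      simp [pvRel, pvAStep, pvBStep, hv]
  | some bc =>
    obtain ⟨b, L⟩ := bc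
    obtain ⟨k, r, hr1, hr2, hL, htag, hcnt, hflag⟩ := h
    simp only at htag hcnt hflag
    subst hL htag hflag
    by_cases hv : v = t
    · cases b with
      | true =>
        rw [if_pos rfl] at hcnt
        obtain ⟨hv1, hv0⟩ := hcnt; subst hv1 hv0
        simp only [pvAStep, pvBStep, hv, bne_self_eq_false,
          if_pos (show (0:Int) < v1 by omega)]
        rw [if_neg (by decide : ¬ ((true == false) = true))]
        simp only [pvRel]
        refine ⟨0, 1, by norm_num, by norm_num, by norm_num, ?_, by norm_num, by norm_num⟩
        simp [pvRunTag_eq true k v1 hr1 hr2, pvTagChar, List.replicate_succ']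
      | false =>
        rw [if_neg (by simp)] at hcnt
        obtain ⟨hv0, hv1⟩ := hcnt; subst hv0 hv1
        by_cases h255 : v0 = 255
        · subst h255
          simp only [pvAStep, pvBStep, hv, bne_self_eq_false,
            if_neg (lt_irrefl (0:Int))]
          rw [if_pos (by decide : ((false == false) = true))]
          simp only [pvRel]
          refine ⟨k + 1, 1, by norm_num, by norm_num, by push_cast; ring, ?_, by norm_num, by norm_num⟩
          simp [pvTagChar, List.replicate_succ']
        · simp only [pvRel, pvAStep, pvBStep, hv, bne_self_eq_false,
            if_neg (lt_irrefl (0:Int)), if_neg (show ¬ ((if v0 = 255 then (1:Int) else 0) = 1) by simp [h255])]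
          rw [if_pos (by decide : ((false == false) = true))]
          refine ⟨k, v0 + 1, by omega, by omega, by ring, ?_, ?_, ?_⟩ <;>
            simp [pvTagChar, h255]
    · have hbne : (v != t) = true := by simp [hv]
      cases b with
      | false =>
        rw [if_neg (by simp)] at hcnt
        obtain ⟨hv0, hv1⟩ := hcnt; subst hv0 hv1
        simp only [pvAStep, pvBStep, if_neg hv,
          if_pos (show (0:Int) < v0 by omega)]
        rw [hbne, if_neg (by decide : ¬ ((false == true) = true))]
        simp only [pvRel]
        refine ⟨0, 1, by norm_num, by norm_num, by norm_num, ?_, by norm_num, by norm_num⟩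
        simp [pvRunTag_eq false k v0 hr1 hr2, pvTagChar, List.replicate_succ']
      | true =>
        rw [if_pos rfl] at hcnt
        obtain ⟨hv1, hv0⟩ := hcnt; subst hv1 hv0
        by_cases h255 : v1 = 255
        · subst h255
          simp only [pvAStep, pvBStep, if_neg hv,
            if_neg (lt_irrefl (0:Int))]
          rw [hbne, if_pos (by decide : ((true == true) = true))]
          simp only [pvRel]
          refine ⟨k + 1, 1, by norm_num, by norm_num, by push_cast; ring, ?_, by norm_num, by norm_num⟩
          simp [pvTagChar, List.replicate_succ']
        · simp only [pvRel, pvAStep, pvBStep, if_neg hv,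
            if_neg (lt_irrefl (0:Int)), if_neg (show ¬ ((if v1 = 255 then (1:Int) else 0) = 1) by simp [h255])]
          rw [hbne, if_pos (by decide : ((true == true) = true))]
          refine ⟨k, v1 + 1, by omega, by omega, by ring, ?_, ?_, ?_⟩ <;>
            simp [pvTagChar, h255]

lemma pvRel_foldl (t : Int) (xs : List Int)
    (a : List Char × Int × Int × Int × List Int)
    (s : List (Bool × Int) × Option (Bool × Int)) (h : pvRel a s) :
    pvRel (xs.foldl (pvAStep t) a) (xs.foldl (pvBStep t) s) := by
  induction xs generalizing a s with
  | nil => exact h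
  | cons x xs ih => exact ih _ _ (pvRel_step t x a s h)

lemma pv_pad_eq (n : Nat) :
    (n + 7) / 8 * 8 - n = (PySem.Int.mod (-(n : Int)) 8).toNat := by
  rw [PySem.Int.mod_eq_emod_of_pos (by norm_num)]
  omega

-- ===== VERDICT (by name: the statement is the Claim_ definition above) =====
theorem run_len_float_spec : Claim_equal_run_len_float := by
  intro val_dset none_tag run_len run_val _
  unfold Spec_run_len_float run_len_float run_len_float_alt
  have h := pvRel_foldl none_tag val_dset
    (([] : List Char), (0 : Int), (0 : Int), (0 : Int), run_len)
    (([] : List (Bool × Int)), (none : Option (Bool × Int)))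
    (by simp [pvRel])
  set a := val_dset.foldl (pvAStep none_tag) (([] : List Char), 0, 0, 0, run_len) with ha
  set s := val_dset.foldl (pvBStep none_tag) (([] : List (Bool × Int)), none) with hs
  obtain ⟨tag, v0, v1, flag, rl⟩ := a
  obtain ⟨runs, cur⟩ := s
  -- the two final tags are equal; the padding then agrees by pv_pad_eq
  suffices hT : (if v0 > 0 then tag ++ ['0'] else tag ++ ['1']) =
      (if (match (runs, cur).2 with
            | some c => (runs, cur).1 ++ [c]
            | none => (runs, cur).1).isEmpty then ['1']
        else (((match (runs, cur).2 with
            | some c => (runs, cur).1 ++ [c]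
            | none => (runs, cur).1).map pvRunTag).flatten)) by
    simp only [hT, pv_pad_eq]
  cases cur with
  | none =>
    obtain ⟨hr, ht, h0, _, _⟩ := h
    subst hr ht h0
    simp
  | some bc =>
    obtain ⟨b, L⟩ := bc
    obtain ⟨k, r, hr1, hr2, hL, htag, hcnt, _⟩ := h
    subst hL htag
    simp only [List.map_append, List.flatten_append]
    cases b with
    | true =>
      rw [if_pos rfl] at hcnt
      simp only at hcnt
      obtain ⟨_, hv0⟩ := hcnt
      subst hv0
      simp [pvRunTag_eq true k r hr1 hr2, pvTagChar, List.replicate_succ']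
    | false =>
      rw [if_neg (by simp)] at hcnt
      simp only at hcnt
      obtain ⟨hv0, _⟩ := hcnt
      subst hv0
      rw [if_pos (show (0:Int) < v0 by omega)]
      simp [pvRunTag_eq false k v0 hr1 hr2, pvTagChar, List.replicate_succ']
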